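-- pv_equiv track=rewrite | github.com/Caume/HerraduraKEx | SecurityProofsCode/hkex_cfscx_blong.py | s5_progressive
-- ===== SOURCE A (Python) =====
-- def rol(x, bits, n):
--     bits %= n
--     return ((x << bits) | (x >> (n - bits))) & ((1 << n) - 1)
--
-- def fscx(A, B, n):
--     s = A ^ B
--     return s ^ rol(s, 1, n) ^ rol(s, n - 1, n)
--
-- def fscx_revolve(A, B, steps, n):
--     for _ in range(steps):
--         A = fscx(A, B, n)
--     return A
--
-- CHUNKS = 4
--
-- def split_chunks(B_large, n):
--     """Split 4n-bit B into [B1, B2, B3, B4], each n bits (MSB first)."""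
--     mask = (1 << n) - 1
--     return [(B_large >> ((CHUNKS - 1 - i) * n)) & mask for i in range(CHUNKS)]
--
-- def join_chunks(chunks, n):
--     result = 0
--     for c in chunks:
--         result = (result << n) | (c & ((1 << n) - 1))
--     return result
--
-- def s5_progressive(A, B_large, r, n):
--     """S5: each stage feeds back into next (A ⊕ prev output as start). Output: 4n-bit."""
--     Bs = split_chunks(B_large, n)
--     outputs = []
--     t_prev = 0
--     for Bi in Bs:
--         t = fscx_revolve(A ^ t_prev, Bi, r, n)
--         outputs.append(t)
--         t_prev = t
--     return join_chunks(outputs, n)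
-- ===== SOURCE B (Python) =====
-- # B: same S5 transform, but the r-fold inner iteration is run with cycle
-- # detection: states are memoized in a dict, and as soon as a state repeats the
-- # remaining steps are reduced modulo the cycle length instead of being executed.
--
-- CHUNKS = 4
--
--
-- def _rol(x, bits, n):
--     bits %= n
--     return ((x << bits) | (x >> (n - bits))) & ((1 << n) - 1)
--
--
-- def _step(x, b, n):
--     s = x ^ b
--     return s ^ _rol(s, 1, n) ^ _rol(s, n - 1, n)
--
--
-- def _revolve_cyc(x, b, steps, n):
--     seen = {}
--     k = 0
--     while k < steps:
--         if x in seen: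
--             period = k - seen[x]
--             for _ in range((steps - k) % period):
--                 x = _step(x, b, n)
--             return x
--         seen[x] = k
--         x = _step(x, b, n)
--         k += 1
--     return x
--
--
-- def s5_progressive(A, B_large, r, n):
--     mask = (1 << n) - 1
--     result = 0
--     t = 0
--     for i in range(CHUNKS):
--         Bi = (B_large >> ((CHUNKS - 1 - i) * n)) & mask
--         t = _revolve_cyc(A ^ t, Bi, r, n)
--         result = (result << n) | (t & mask)
--     return result
-- ===== Notes on version B (the rewrite author's own statement) =====
-- stated objective: alternative
-- what changed: B replaces the blind r-fold iteration of the per-chunk transform by cycle detection: it memoizes every state in a dict and, on the first repeat, reduces the remaining steps modulo the cycle length and finishes with at most period-1 extra steps; the chunk split/join lists are fused into one accumulator pass.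
import Mathlib
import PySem

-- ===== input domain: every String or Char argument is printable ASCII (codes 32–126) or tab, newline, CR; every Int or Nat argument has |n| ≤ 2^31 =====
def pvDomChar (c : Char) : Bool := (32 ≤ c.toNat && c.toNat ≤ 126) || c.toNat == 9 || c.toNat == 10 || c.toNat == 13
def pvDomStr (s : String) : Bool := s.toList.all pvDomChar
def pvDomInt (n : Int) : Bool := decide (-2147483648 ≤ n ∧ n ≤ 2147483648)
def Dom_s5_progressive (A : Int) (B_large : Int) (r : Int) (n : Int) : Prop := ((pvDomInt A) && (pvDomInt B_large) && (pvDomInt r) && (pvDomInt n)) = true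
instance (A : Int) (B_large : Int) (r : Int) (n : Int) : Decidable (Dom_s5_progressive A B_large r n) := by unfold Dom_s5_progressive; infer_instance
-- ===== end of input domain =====

-- B replaces the blind r-fold iteration of the affine GF(2) step by cycle
-- detection (memoize seen states, jump over full cycles via r mod period);
-- equivalence of the RETURN value is proved for all inputs where A returns.

-- ===== PORT A =====
-- rol(x, bits, n): shift amounts are nonnegative under Pre_ (bits %= n with n > 0),
-- so .toNat is exact there
def rolA (x : Int) (bits : Int) (n : Int) : Int :=
  let b := PySem.Int.mod bits n
  PySem.Int.band (PySem.Int.bor (x <<< b.toNat) (x >>> (n - b).toNat)) (((1 : Int) <<< n.toNat) - 1)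

def fscxA (A : Int) (B : Int) (n : Int) : Int :=
  let s := PySem.Int.bxor A B
  PySem.Int.bxor (PySem.Int.bxor s (rolA s 1 n)) (rolA s (n - 1) n)

-- 'for _ in range(steps)': steps.toNat iterations (empty for steps ≤ 0, as in Python)
def revLoopA (B : Int) (n : Int) : Int → Nat → Int
  | a, 0 => a
  | a, m + 1 => revLoopA B n (fscxA a B n) m

def fscxRevolveA (A : Int) (B : Int) (steps : Int) (n : Int) : Int :=
  revLoopA B n A steps.toNat

def splitChunksA (B_large : Int) (n : Int) : List Int :=
  let mask : Int := ((1 : Int) <<< n.toNat) - 1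
  (PySem.List.pyRange 0 4 1).map
    (fun i => PySem.Int.band (B_large >>> ((4 - 1 - i) * n).toNat) mask)

def joinChunksA (chunks : List Int) (n : Int) : Int :=
  chunks.foldl
    (fun result c => PySem.Int.bor (result <<< n.toNat)
      (PySem.Int.band c (((1 : Int) <<< n.toNat) - 1))) 0

def s5_progressive (A : Int) (B_large : Int) (r : Int) (n : Int) : Int :=
  let Bs := splitChunksA B_large n
  let acc := Bs.foldl
    (fun (acc : List Int × Int) Bi =>
      let t := fscxRevolveA (PySem.Int.bxor A acc.2) Bi r n
      (acc.1 ++ [t], t)) ([], 0)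
  joinChunksA acc.1 n

-- ===== PORT B =====
def rolB (x : Int) (bits : Int) (n : Int) : Int :=
  let b := PySem.Int.mod bits n
  PySem.Int.band (PySem.Int.bor (x <<< b.toNat) (x >>> (n - b).toNat)) (((1 : Int) <<< n.toNat) - 1)

def stepB (x : Int) (b : Int) (n : Int) : Int :=
  let s := PySem.Int.bxor x b
  PySem.Int.bxor (PySem.Int.bxor s (rolB s 1 n)) (rolB s (n - 1) n)

-- 'for _ in range(rem)'
def iterStepsB (b : Int) (n : Int) : Int → Nat → Int
  | x, 0 => x
  | x, m + 1 => iterStepsB b n (stepB x b n) m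

-- 'while k < steps': fuel = (steps - k).toNat
def cycLoopB (b : Int) (steps : Int) (n : Int) :
    Int → PySem.Dict Int Int → Int → Nat → Int
  | x, _, _, 0 => x
  | x, seen, k, fuel + 1 =>
    match seen.get? x with
    | some i => iterStepsB b n x (PySem.Int.mod (steps - k) (k - i)).toNat
    | none => cycLoopB b steps n (stepB x b n) (seen.insert x k) (k + 1) fuel

def revolveCycB (x : Int) (b : Int) (steps : Int) (n : Int) : Int :=
  cycLoopB b steps n x PySem.Dict.empty 0 steps.toNat

def s5_progressive_alt (A : Int) (B_large : Int) (r : Int) (n : Int) : Int :=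
  let mask : Int := ((1 : Int) <<< n.toNat) - 1
  let acc := (PySem.List.pyRange 0 4 1).foldl
    (fun (acc : Int × Int) i =>
      let Bi := PySem.Int.band (B_large >>> ((4 - 1 - i) * n).toNat) mask
      let t := revolveCycB (PySem.Int.bxor A acc.2) Bi r n
      (PySem.Int.bor (acc.1 <<< n.toNat) (PySem.Int.band t mask), t)) (0, 0)
  acc.1

-- ===== PRECONDITION & SPEC =====
-- Exactly the inputs on which the Python A returns: n < 0 raises ValueError on
-- a negative shift, and n = 0 with r > 0 raises ZeroDivisionError in rol.
def Pre_s5_progressive (A : Int) (B_large : Int) (r : Int) (n : Int) : Prop :=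
  0 < n ∨ (n = 0 ∧ r ≤ 0)
instance (A : Int) (B_large : Int) (r : Int) (n : Int) : Decidable (Pre_s5_progressive A B_large r n) := by unfold Pre_s5_progressive; infer_instance

def pvWitness_s5_progressive : Int × Int × Int × Int := (13, 200435, 5, 4)

def Spec_s5_progressive (A : Int) (B_large : Int) (r : Int) (n : Int) (out : Int) : Prop := out = s5_progressive_alt A B_large r n
instance (A : Int) (B_large : Int) (r : Int) (n : Int) (out : Int) : Decidable (Spec_s5_progressive A B_large r n out) := by unfold Spec_s5_progressive; infer_instance

-- ===== CLAIM (what is proved, stated in full; the proofs are below) =====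
def Claim_equal_s5_progressive : Prop := ∀ (A : Int) (B_large : Int) (r : Int) (n : Int), Dom_s5_progressive A B_large r n → Pre_s5_progressive A B_large r n → Spec_s5_progressive A B_large r n (s5_progressive A B_large r n)

-- ===== LEMMAS AND PROOFS =====

theorem step_eq (x b n : Int) : fscxA x b n = stepB x b n := rfl

theorem iterStepsB_eq_iterate (b n : Int) (m : Nat) (x : Int) :
    iterStepsB b n x m = (fun y => stepB y b n)^[m] x := by
  induction m generalizing x with
  | zero => rfl
  | succ m ih => simp [iterStepsB, ih, Function.iterate_succ_apply]

theorem revLoopA_eq_iterate (b n : Int) (m : Nat) (x : Int) :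
    revLoopA b n x m = (fun y => stepB y b n)^[m] x := by
  induction m generalizing x with
  | zero => rfl
  | succ m ih => simp [revLoopA, step_eq, ih, Function.iterate_succ_apply]

-- core periodicity lemma for orbits of g
theorem iter_mod {α : Type} (g : α → α) (x : α) (a p : Nat) (hp : 0 < p)
    (h : g^[a + p] x = g^[a] x) : ∀ d, g^[a + d] x = g^[a + d % p] x := by
  intro d
  induction d using Nat.strong_induction_on with
  | _ d ih =>
    by_cases hd : d < p
    · rw [Nat.mod_eq_of_lt hd]
    · have hdp : p ≤ d := le_of_not_gt hd
      have h1 : a + d = (d - p) + (a + p) := by omega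
      have h2 : g^[a + d] x = g^[(d - p) + a] x := by
        rw [h1, Function.iterate_add_apply, h, ← Function.iterate_add_apply]
      have h3 : (d - p) + a = a + (d - p) := by omega
      rw [Nat.mod_eq_sub_mod hdp, h2, h3, ih (d - p) (by omega)]

theorem cycLoop_eq (b steps n : Int) :
    ∀ (fuel : Nat) (x0 x : Int) (seen : PySem.Dict Int Int) (k : Int),
      0 ≤ k →
      fuel = (steps - k).toNat →
      x = iterStepsB b n x0 k.toNat →
      (∀ s i, seen.get? s = some i → 0 ≤ i ∧ i < k ∧ s = iterStepsB b n x0 i.toNat) →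
      cycLoopB b steps n x seen k fuel = iterStepsB b n x0 (max steps k).toNat := by
  intro fuel
  induction fuel with
  | zero =>
    intro x0 x seen k hk hfuel hx _
    have hks : steps ≤ k := by omega
    have : (max steps k).toNat = k.toNat := by omega
    simpa [cycLoopB, this] using hx
  | succ fuel ih =>
    intro x0 x seen k hk hfuel hx hinv
    have hlt : k < steps := by omega
    have hmax : (max steps k).toNat = steps.toNat := by omega
    rw [hmax]
    cases hget : seen.get? x with
    | some i =>
      simp only [cycLoopB, hget]
      obtain ⟨hi0, hik, hxi⟩ := hinv x i hget
      -- notation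
      set g := fun y => stepB y b n with hg
      have hxk : x = g^[k.toNat] x0 := by rw [hx, iterStepsB_eq_iterate]
      have hxi' : x = g^[i.toNat] x0 := by rw [hxi, iterStepsB_eq_iterate]
      have hpPos : (0 : Int) < k - i := by omega
      set pN := (k - i).toNat with hpN
      have hpN0 : 0 < pN := by omega
      have hper : g^[i.toNat + pN] x0 = g^[i.toNat] x0 := by
        have : i.toNat + pN = k.toNat := by omega
        rw [this, ← hxk, hxi']

      have hrem : PySem.Int.mod (steps - k) (k - i)
          = (((steps - k).toNat % pN : Nat) : Int) := by
        have h1 : steps - k = (((steps - k).toNat : Nat) : Int) := by omega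
        have h2 : k - i = ((pN : Nat) : Int) := by omega
        conv_lhs => rw [h1, h2]
        rw [PySem.Int.mod_natCast]
      set dN := (steps - k).toNat with hdN
      have hremN : (PySem.Int.mod (steps - k) (k - i)).toNat = dN % pN := by
        rw [hrem]; omega
      rw [hremN, iterStepsB_eq_iterate, hxk, ← Function.iterate_add_apply,
        iterStepsB_eq_iterate]
      have e1 : dN % pN + k.toNat = i.toNat + (pN + dN % pN) := by omega
      have e2 : steps.toNat = i.toNat + (pN + dN) := by omega
      rw [e1, e2, iter_mod g x0 i.toNat pN hpN0 hper (pN + dN % pN),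
        iter_mod g x0 i.toNat pN hpN0 hper (pN + dN), Nat.add_mod_left,
        Nat.add_mod_left, Nat.mod_mod_of_dvd dN (dvd_refl pN)]
    | none =>
      simp only [cycLoopB, hget]
      have := ih x0 (stepB x b n) (seen.insert x k) (k + 1) (by omega) (by omega)
        (by
          rw [iterStepsB_eq_iterate, hx, iterStepsB_eq_iterate]
          have : (k + 1).toNat = k.toNat + 1 := by omega
          rw [this, Function.iterate_succ_apply'])
        (by
          intro s i hs
          rw [PySem.Dict.get?_insert] at hs
          by_cases hsx : s = x
          · simp [hsx] at hs
            refine ⟨by omega, by omega, ?_⟩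
            rw [← hs, hsx, hx]
          · simp [hsx] at hs
            obtain ⟨h1, h2, h3⟩ := hinv s i hs
            exact ⟨h1, by omega, h3⟩)
      rw [this]
      congr 1
      omega

theorem revolve_eq (x b steps n : Int) :
    revolveCycB x b steps n = fscxRevolveA x b steps n := by
  unfold revolveCycB fscxRevolveA
  have h := cycLoop_eq b steps n steps.toNat x x PySem.Dict.empty 0 (le_refl 0)
    (by omega) rfl
    (by intro s i hs; rw [PySem.Dict.get?_empty] at hs; exact absurd hs (by simp))
  rw [h]
  have : (max steps 0).toNat = steps.toNat := by omega
  rw [this, iterStepsB_eq_iterate, revLoopA_eq_iterate]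

theorem main_eq (A B_large r n : Int) :
    s5_progressive A B_large r n = s5_progressive_alt A B_large r n := by
  have hr : PySem.List.pyRange 0 4 1 = [0, 1, 2, 3] := by decide
  simp only [s5_progressive, s5_progressive_alt, splitChunksA, joinChunksA,
    revolve_eq, hr, List.map, List.foldl]
  rfl

-- ===== VERDICT (by name: the statement is the Claim_ definition above) =====
theorem s5_progressive_spec : Claim_equal_s5_progressive := by
  intro A B_large r n _ _
  unfold Spec_s5_progressive
  exact main_eq A B_large r n
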